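-- pv_equiv track=rewrite | github.com/yannra/netket | scripts/symmetries.py | get_symms_square_lattice
-- ===== SOURCE A (Python) =====
-- def get_symms_square_lattice(system_edge_length, translations=True, point_group=True):
--     if translations:
--         shifts = range(system_edge_length)
--     else:
--         shifts = [0]
--
--     if point_group:
--         group_ops = []
--         group_ops.append([[1, 0], [0, 1]])
--         group_ops.append([[-1, 0], [0, 1]])
--         group_ops.append([[1, 0], [0, -1]])
--         group_ops.append([[-1, 0], [0, -1]])
--         group_ops.append([[0, 1], [1, 0]])
--         group_ops.append([[0, 1], [-1, 0]])
--         group_ops.append([[0, -1], [1, 0]])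
--         group_ops.append([[0, -1], [-1, 0]])
--     else:
--         group_ops = [[[1, 0], [0, 1]]]
--
--     transl = []
--     for y_shift in shifts:
--         for x_shift in shifts:
--             for point_group in group_ops:
--                 ids = []
--                 for y_start in range(system_edge_length):
--                     for x_start in range(system_edge_length):
--                         x = point_group[0][0] * x_start + point_group[0][1] * y_start
--                         y = point_group[1][0] * x_start + point_group[1][1] * y_start
--                         ids.append(get_id_from_pos_2D_square(system_edge_length, x + x_shift, y + y_shift))
--                 transl.append(ids)
--
--     return transl
--
-- def get_id_from_pos_2D_square(system_edge_length, x, y):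
--     column = x % system_edge_length
--     row = y % system_edge_length
--
--     return row * system_edge_length + column
-- ===== SOURCE B (Python) =====
-- def get_symms_square_lattice(system_edge_length, translations=True, point_group=True):
--     L = system_edge_length
--     if translations:
--         shifts = range(L)
--     else:
--         shifts = [0]
--
--     if point_group:
--         group_ops = [
--             [[1, 0], [0, 1]],
--             [[-1, 0], [0, 1]],
--             [[1, 0], [0, -1]],
--             [[-1, 0], [0, -1]],
--             [[0, 1], [1, 0]],
--             [[0, 1], [-1, 0]],
--             [[0, -1], [1, 0]],
--             [[0, -1], [-1, 0]],
--         ]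
--     else:
--         group_ops = [[[1, 0], [0, 1]]]
--
--     # Apply each point-group op once, at zero shift, keeping wrapped (row, col) pairs.
--     base = []
--     for op in group_ops:
--         rc = []
--         for y in range(L):
--             for x in range(L):
--                 rc.append(((op[1][0] * x + op[1][1] * y) % L,
--                            (op[0][0] * x + op[0][1] * y) % L))
--         base.append(rc)
--
--     # Translate via per-shift lookup tables; no arithmetic in the inner loop.
--     transl = []
--     for y_shift in shifts:
--         row_table = [((r + y_shift) % L) * L for r in range(L)]
--         for x_shift in shifts:
--             col_table = [(c + x_shift) % L for c in range(L)]
--             for rc in base: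
--                 transl.append([row_table[r] + col_table[c] for r, c in rc])
--     return transl
-- ===== Notes on version B (the rewrite author's own statement) =====
-- stated objective: alternative
-- what changed: B applies each 2x2 point-group op only once into a per-op table of wrapped (row, col) pairs and then produces every translated copy by indexing per-shift lookup tables, instead of re-applying the matrix and the modular wrap for every (y_shift, x_shift, op, position) tuple.
import Mathlib
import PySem

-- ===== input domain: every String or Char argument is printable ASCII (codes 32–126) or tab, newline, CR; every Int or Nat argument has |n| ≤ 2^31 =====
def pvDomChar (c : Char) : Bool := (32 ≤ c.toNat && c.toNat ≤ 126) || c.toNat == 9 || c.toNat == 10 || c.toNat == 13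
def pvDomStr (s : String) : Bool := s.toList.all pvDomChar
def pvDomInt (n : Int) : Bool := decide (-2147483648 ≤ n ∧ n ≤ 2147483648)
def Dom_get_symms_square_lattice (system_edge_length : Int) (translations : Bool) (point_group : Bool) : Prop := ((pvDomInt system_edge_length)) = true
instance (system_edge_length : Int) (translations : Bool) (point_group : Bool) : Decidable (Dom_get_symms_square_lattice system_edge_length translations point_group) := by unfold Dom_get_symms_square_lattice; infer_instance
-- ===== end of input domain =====

-- B applies each point-group op once into a per-op (row, col) table and derives all translations via per-shift lookup tables; same return value.


-- ===== PORT A =====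
-- helper get_id_from_pos_2D_square from the same module
def get_id_from_pos_2D_square (system_edge_length x y : Int) : Int :=
  let column := PySem.Int.mod x system_edge_length
  let row := PySem.Int.mod y system_edge_length
  row * system_edge_length + column

-- the constant 2x2 matrices, rows as pairs
def pvOpsA (point_group : Bool) : List ((Int × Int) × (Int × Int)) :=
  if point_group then
    [((1,0),(0,1)), ((-1,0),(0,1)), ((1,0),(0,-1)), ((-1,0),(0,-1)),
     ((0,1),(1,0)), ((0,1),(-1,0)), ((0,-1),(1,0)), ((0,-1),(-1,0))]
  else [((1,0),(0,1))]

def get_symms_square_lattice (system_edge_length : Int) (translations : Bool) (point_group : Bool) : List (List Int) :=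
  let shifts := if translations then PySem.List.pyRange 0 system_edge_length 1 else [0]
  let group_ops := pvOpsA point_group
  shifts.foldl (fun transl y_shift =>
    shifts.foldl (fun transl x_shift =>
      group_ops.foldl (fun transl op =>
        transl ++ [(PySem.List.pyRange 0 system_edge_length 1).foldl (fun ids y_start =>
          (PySem.List.pyRange 0 system_edge_length 1).foldl (fun ids x_start =>
            let x := op.1.1 * x_start + op.1.2 * y_start
            let y := op.2.1 * x_start + op.2.2 * y_start
            ids ++ [get_id_from_pos_2D_square system_edge_length (x + x_shift) (y + y_shift)]) ids) []]) transl) transl) []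

-- ===== PORT B =====
def pvOpsB (point_group : Bool) : List ((Int × Int) × (Int × Int)) :=
  if point_group then
    [((1,0),(0,1)), ((-1,0),(0,1)), ((1,0),(0,-1)), ((-1,0),(0,-1)),
     ((0,1),(1,0)), ((0,1),(-1,0)), ((0,-1),(1,0)), ((0,-1),(-1,0))]
  else [((1,0),(0,1))]

def get_symms_square_lattice_alt (system_edge_length : Int) (translations : Bool) (point_group : Bool) : List (List Int) :=
  let L := system_edge_length
  let shifts := if translations then PySem.List.pyRange 0 L 1 else [0]
  let group_ops := pvOpsB point_group
  -- apply each point-group op once, at zero shift, keeping wrapped (row, col) pairs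
  let base := group_ops.foldl (fun base op =>
    base ++ [(PySem.List.pyRange 0 L 1).foldl (fun rc y =>
      (PySem.List.pyRange 0 L 1).foldl (fun rc x =>
        rc ++ [(PySem.Int.mod (op.2.1 * x + op.2.2 * y) L,
                PySem.Int.mod (op.1.1 * x + op.1.2 * y) L)]) rc) []]) []
  -- translate via per-shift lookup tables
  shifts.foldl (fun transl y_shift =>
    let row_table := (PySem.List.pyRange 0 L 1).map (fun r => PySem.Int.mod (r + y_shift) L * L)
    shifts.foldl (fun transl x_shift =>
      let col_table := (PySem.List.pyRange 0 L 1).map (fun c => PySem.Int.mod (c + x_shift) L)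
      base.foldl (fun transl rc =>
        transl ++ [rc.map (fun p =>
          PySem.List.pyGetD row_table p.1 0 + PySem.List.pyGetD col_table p.2 0)]) transl) transl) []

-- ===== PRECONDITION & SPEC =====
def Spec_get_symms_square_lattice (system_edge_length : Int) (translations : Bool) (point_group : Bool) (out : List (List Int)) : Prop := out = get_symms_square_lattice_alt system_edge_length translations point_group
instance (system_edge_length : Int) (translations : Bool) (point_group : Bool) (out : List (List Int)) : Decidable (Spec_get_symms_square_lattice system_edge_length translations point_group out) := by unfold Spec_get_symms_square_lattice; infer_instance

-- ===== CLAIM (what is proved, stated in full; the proofs are below) =====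
def Claim_equal_get_symms_square_lattice : Prop := ∀ (system_edge_length : Int) (translations : Bool) (point_group : Bool), Dom_get_symms_square_lattice system_edge_length translations point_group → Spec_get_symms_square_lattice system_edge_length translations point_group (get_symms_square_lattice system_edge_length translations point_group)

-- ===== LEMMAS AND PROOFS =====

-- core arithmetic fact: wrapping before shifting and re-wrapping agrees with shifting then wrapping
theorem pv_lookup_eq (L v s : Int) (hL : 0 < L) :
    PySem.Int.mod (PySem.Int.mod v L + s) L = PySem.Int.mod (v + s) L := by
  simp only [PySem.Int.mod_eq_emod_of_pos hL]
  exact Int.emod_add_emod v L s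

-- ===== VERDICT =====
theorem get_symms_square_lattice_spec : Claim_equal_get_symms_square_lattice := by
  intro L tr pg _
  unfold Spec_get_symms_square_lattice get_symms_square_lattice get_symms_square_lattice_alt
  simp only [PySem.List.foldl_append_singleton_eq_map, PySem.List.foldl_append_eq_flatMap,
    List.nil_append, List.map_map]
  apply List.flatMap_congr; intro ysh _
  apply List.flatMap_congr; intro xsh _
  apply List.map_congr_left; intro op _
  simp only [Function.comp]
  rw [List.map_flatMap]
  apply List.flatMap_congr; intro yst hy
  rw [List.map_map]
  apply List.map_congr_left; intro xst hx
  have hL : 0 < L := by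
    rcases PySem.List.mem_pyRange_one.mp hy with ⟨h1, h2⟩; omega
  simp only [get_id_from_pos_2D_square, Function.comp]
  rw [PySem.List.pyGetD_map_pyRange_of_nonneg _ L _ 0 (PySem.Int.mod_nonneg _ hL) (PySem.Int.mod_lt _ hL),
    PySem.List.pyGetD_map_pyRange_of_nonneg _ L _ 0 (PySem.Int.mod_nonneg _ hL) (PySem.Int.mod_lt _ hL),
    pv_lookup_eq _ _ _ hL, pv_lookup_eq _ _ _ hL]
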